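-- pv_equiv track=rewrite | github.com/martinlschumann/safeguard-system | read_out_txt.py | split_list_by_consecutive_newlines
-- ===== SOURCE A (Python) =====
-- def split_list_by_consecutive_newlines(input_list):
--     """Splits list into sub-lists everytime 3 consecutive newlines are encountered,
--     which means a new linear-ensembling run.
--
--     Generated with ChatGPT.
--     """
--     result = []
--     current_sublist = []
--
--     for item in input_list:
--         if item == "\n" and current_sublist.count("\n") == 2:
--             # Three consecutive newlines encountered, start a new sublist
--             result.append(current_sublist[:-2])  # Exclude the last two newlines
--             current_sublist = []
--         else:
--             current_sublist.append(item)
--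
--     # Add the last sublist if it is not empty
--     if current_sublist:
--         result.append(current_sublist)
--
--     return result
-- ===== SOURCE B (Python) =====
-- def split_list_by_consecutive_newlines(input_list):
--     """Two-phase version: record split boundary indices in one scan with a
--     per-segment newline counter, then emit sublists by slicing the original list."""
--     boundaries = []
--     cnt = 0
--     for i, item in enumerate(input_list):
--         if item == "\n":
--             if cnt == 2:
--                 boundaries.append(i)
--                 cnt = 0
--             else:
--                 cnt += 1
--     result = []
--     start = 0
--     for b in boundaries:
--         result.append(input_list[start:b - 2])
--         start = b + 1
--     if start < len(input_list):
--         result.append(input_list[start:])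
--     return result
-- ===== Notes on version B (the rewrite author's own statement) =====
-- stated objective: alternative
-- what changed: B replaces A's single pass that incrementally grows and re-counts a current sublist with a two-phase algorithm: one scan records split-boundary indices using a per-segment newline counter, then the result is produced by slicing the original list at those boundaries.
import Mathlib
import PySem

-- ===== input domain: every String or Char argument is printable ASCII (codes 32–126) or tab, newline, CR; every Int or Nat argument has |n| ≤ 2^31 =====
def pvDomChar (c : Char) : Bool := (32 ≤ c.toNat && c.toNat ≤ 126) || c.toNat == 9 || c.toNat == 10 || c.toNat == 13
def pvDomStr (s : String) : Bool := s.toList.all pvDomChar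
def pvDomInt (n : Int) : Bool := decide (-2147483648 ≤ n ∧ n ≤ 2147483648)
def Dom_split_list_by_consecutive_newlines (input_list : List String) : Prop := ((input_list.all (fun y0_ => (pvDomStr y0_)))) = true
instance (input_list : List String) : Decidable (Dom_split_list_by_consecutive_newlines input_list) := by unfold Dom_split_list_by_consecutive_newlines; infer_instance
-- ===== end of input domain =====

-- B records boundary indices in one scan and then slices the original list, instead of
-- A's incremental building of a current sublist that is re-counted at every newline.

-- ===== PORT A =====
-- A's loop: state (result, current_sublist), branch order as in the Python.
def pvLoopA : List String → List (List String) → List String → List (List String)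
  | [], result, cur => if cur ≠ [] then result ++ [cur] else result
  | item :: xs, result, cur =>
    if item = "\n" ∧ PySem.List.count cur "\n" = 2 then
      pvLoopA xs (result ++ [PySem.List.slice cur none (some (-2))]) []
    else
      pvLoopA xs result (cur ++ [item])

def split_list_by_consecutive_newlines (input_list : List String) : List (List String) :=
  pvLoopA input_list [] []

-- ===== PORT B =====
-- phase 1 of Source B: for i, item in enumerate(input_list): record boundary indices
def pvScanB : List String → Int → Int → List Int → List Int
  | [], _, _, bs => bs
  | item :: xs, i, cnt, bs =>
    if item = "\n" then
      if cnt = 2 then pvScanB xs (i + 1) 0 (bs ++ [i])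
      else pvScanB xs (i + 1) (cnt + 1) bs
    else pvScanB xs (i + 1) cnt bs

-- phase 2 of Source B: for b in boundaries: slice input_list[start:b-2]; then the tail
def pvEmitB (input : List String) : List Int → List (List String) → Int → List (List String)
  | [], result, start =>
      if start < (input.length : Int) then result ++ [PySem.List.slice input (some start) none]
      else result
  | b :: bs, result, start =>
      pvEmitB input bs (result ++ [PySem.List.slice input (some start) (some (b - 2))]) (b + 1)

def split_list_by_consecutive_newlines_alt (input_list : List String) : List (List String) :=
  pvEmitB input_list (pvScanB input_list 0 0 []) [] 0

-- ===== PRECONDITION & SPEC =====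
def Spec_split_list_by_consecutive_newlines (input_list : List String) (out : List (List String)) : Prop := out = split_list_by_consecutive_newlines_alt input_list
instance (input_list : List String) (out : List (List String)) : Decidable (Spec_split_list_by_consecutive_newlines input_list out) := by unfold Spec_split_list_by_consecutive_newlines; infer_instance

-- ===== CLAIM (what is proved, stated in full; the proofs are below) =====
def Claim_equal_split_list_by_consecutive_newlines : Prop := ∀ (input_list : List String), Dom_split_list_by_consecutive_newlines input_list → Spec_split_list_by_consecutive_newlines input_list (split_list_by_consecutive_newlines input_list)

-- ===== LEMMAS AND PROOFS =====

-- pvScanB over its accumulator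
theorem pvScanB_acc (xs : List String) (i cnt : Int) (bs : List Int) :
    pvScanB xs i cnt bs = bs ++ pvScanB xs i cnt [] := by
  induction xs generalizing i cnt bs with
  | nil => simp [pvScanB]
  | cons x xs ih =>
    simp only [pvScanB]
    split_ifs with h1 h2
    · rw [ih (i+1) 0 (bs ++ [i]), ih (i+1) 0 ([] ++ [i])]; simp
    · exact ih _ _ _
    · exact ih _ _ _

-- main invariant: A's loop from state (res, cur) equals B's two phases, where cur is
-- the segment of the original input starting at `start` and the scan resumes at index
-- start + cur.length with counter cur.count "\n".
theorem pvMain (xs : List String) (input : List String) (res : List (List String))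
    (cur : List String) (start : Nat)
    (hdrop : input.drop start = cur ++ xs) :
    pvLoopA xs res cur =
      pvEmitB input (pvScanB xs ((start : Int) + cur.length) (cur.count "\n" : Int) []) res start := by
  induction xs generalizing res cur start with
  | nil =>
    simp only [pvLoopA, pvScanB, pvEmitB]
    have hcur : input.drop start = cur := by simpa using hdrop
    by_cases hc : cur = []
    · have hge : input.length ≤ start := by
        have : input.drop start = [] := by rw [hcur, hc]
        exact List.drop_eq_nil_iff.mp this
      have hnlt : ¬ ((start : Int) < (input.length : Int)) := by exact_mod_cast not_lt.mpr hge
      simp [hc, hnlt]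
    · have hlt : start < input.length := by
        have hne : input.drop start ≠ [] := by rw [hcur]; exact hc
        by_contra h
        exact hne (List.drop_eq_nil_of_le (not_lt.mp h))
      have hlt' : (start : Int) < (input.length : Int) := by exact_mod_cast hlt
      rw [PySem.List.slice_from_natCast]
      simp [hc, hlt', hcur]
  | cons item xs ih =>
    simp only [pvLoopA, pvScanB]
    by_cases hn : item = "\n"
    · by_cases h2 : cur.count "\n" = 2
      · have h2' : (cur.count "\n" : Int) = 2 := by exact_mod_cast h2
        have hclen : 2 ≤ cur.length := by
          have := List.count_le_length (l := cur) (a := "\n"); omega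
        rw [if_pos ⟨hn, by simpa [PySem.List.count_eq] using h2⟩, if_pos hn, if_pos h2']
        rw [pvScanB_acc, List.nil_append, List.cons_append, List.nil_append, pvEmitB]
        have hdrop1 : input.drop start = cur ++ ("\n" :: xs) := by rw [hdrop, hn]
        have hdrop' : input.drop (start + (cur.length + 1)) = ([] : List String) ++ xs := by
          rw [← List.drop_drop, hdrop1]
          have hsplit : cur ++ "\n" :: xs = (cur ++ ["\n"]) ++ xs := by simp
          rw [hsplit]
          simp
        have hrec := ih (res ++ [PySem.List.slice cur none (some (-2))]) []
          (start + (cur.length + 1)) hdrop'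
        simp only [List.length_nil, List.count_nil, Nat.cast_zero, Nat.cast_add,
          Nat.cast_one] at hrec
        have hb2 : ((start : Int) + ((cur.length : Int) + 1) + 0) = (start : Int) + cur.length + 1 := by ring
        have hb3 : ((start : Int) + ((cur.length : Int) + 1)) = (start : Int) + cur.length + 1 := by ring
        rw [hb2, hb3] at hrec
        have hslice : PySem.List.slice cur none (some (-2)) =
            PySem.List.slice input (some (start : Int)) (some ((start : Int) + cur.length - 2)) := by
          rw [PySem.List.slice_to_neg_ofNat cur 2 (by omega)]
          have hb : (start : Int) + (cur.length : Int) - 2 = ((start + (cur.length - 2) : Nat) : Int) := by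
            push_cast [Nat.cast_sub hclen]; ring
          rw [hb, PySem.List.slice_natCast, hdrop1]
          have h4 : start + (cur.length - 2) - start = cur.length - 2 := by omega
          rw [h4, List.take_append_of_le_length (by omega)]
        rw [← hslice]
        exact hrec
      · have h2' : ¬ ((cur.count "\n" : Int) = 2) := by exact_mod_cast h2
        rw [if_neg (by simp [PySem.List.count_eq, h2] : ¬ (item = "\n" ∧ PySem.List.count cur "\n" = 2)),
          if_pos hn, if_neg h2']
        have hdrop2 : input.drop start = (cur ++ [item]) ++ xs := by rw [hdrop]; simp
        have hrec := ih res (cur ++ [item]) start hdrop2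
        have hl : (((cur ++ [item]).length : Nat) : Int) = (cur.length : Int) + 1 := by
          simp
        have hcnt : ((List.count "\n" (cur ++ [item]) : Nat) : Int) = (cur.count "\n" : Int) + 1 := by
          rw [hn]; push_cast [List.count_append]; simp
        rw [hl, hcnt, ← add_assoc] at hrec
        exact hrec
    · rw [if_neg (by simp [hn]), if_neg hn]
      have hdrop2 : input.drop start = (cur ++ [item]) ++ xs := by rw [hdrop]; simp
      have hrec := ih res (cur ++ [item]) start hdrop2
      have hl : (((cur ++ [item]).length : Nat) : Int) = (cur.length : Int) + 1 := by
        simp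
      have hcnt : ((List.count "\n" (cur ++ [item]) : Nat) : Int) = (cur.count "\n" : Int) := by
        push_cast [List.count_append]
        simp [hn]
      rw [hl, hcnt, ← add_assoc] at hrec
      exact hrec

-- ===== VERDICT (by name: the statement is the Claim_ definition above) =====
theorem split_list_by_consecutive_newlines_spec : Claim_equal_split_list_by_consecutive_newlines := by
  intro input_list _
  unfold Spec_split_list_by_consecutive_newlines
  unfold split_list_by_consecutive_newlines split_list_by_consecutive_newlines_alt
  have := pvMain input_list input_list [] [] 0 (by simp)
  simpa using this
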